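-- pv_equiv track=rewrite | github.com/yurekten/sdn-defense | defense_managers/multipath/multipath_manager.py | select_superset_paths
-- ===== SOURCE A (Python) =====
-- def select_superset_paths(paths):
--     selected_paths = paths[:]
--     # select only subset paths, eliminate paths contains others
--     for x in paths:
--         superset = []
--         for y in selected_paths:
--             if set(x) < set(y):
--                 superset.append(y)
--         for deleted_item in superset:
--             ind = selected_paths.index(deleted_item)
--             del selected_paths[ind]
--
--     return selected_paths
-- ===== SOURCE B (Python) =====
-- def select_superset_paths(paths):
--     # Sort indices by node-set size ascending; keep a frontier of minimal sets:
--     # a candidate is dropped iff some already-kept set is a strict subset of it.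
--     sets = [frozenset(p) for p in paths]
--     order = sorted(range(len(paths)), key=lambda i: len(sets[i]))
--     kept = []  # list of (index, frozenset) pairs, the current frontier
--     for i in order:
--         s = sets[i]
--         if not any(fs < s for _, fs in kept):
--             kept.append((i, s))
--     kept_idx = set(i for i, _ in kept)
--     return [p for i, p in enumerate(paths) if i in kept_idx]
-- ===== Notes on version B (the rewrite author's own statement) =====
-- stated objective: faster
-- what changed: A repeatedly re-scans and mutates the selected list (collect proper supersets of each path, then delete each one by a linear list.index pass); B precomputes each path's frozenset once, walks indices in ascending set-size order keeping a frontier of minimal sets, drops a candidate iff some frontier set is a proper subset of it, and rebuilds the result in original order from the kept indices, so the quadratic index-and-delete passes disappear.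
import Mathlib
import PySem

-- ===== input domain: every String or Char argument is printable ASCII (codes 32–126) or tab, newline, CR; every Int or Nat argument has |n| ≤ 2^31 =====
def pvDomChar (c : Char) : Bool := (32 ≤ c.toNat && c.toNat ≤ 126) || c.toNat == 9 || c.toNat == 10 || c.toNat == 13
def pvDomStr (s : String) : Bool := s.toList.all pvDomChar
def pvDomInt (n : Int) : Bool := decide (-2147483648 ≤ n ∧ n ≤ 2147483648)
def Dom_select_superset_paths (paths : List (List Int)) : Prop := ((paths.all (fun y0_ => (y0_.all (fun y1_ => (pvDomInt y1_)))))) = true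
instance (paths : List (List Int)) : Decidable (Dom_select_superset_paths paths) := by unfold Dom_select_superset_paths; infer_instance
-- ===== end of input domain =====

-- B replaces A's repeated mutate-and-delete scans by one size-ascending frontier pass over
-- precomputed node-sets (objective: alternative decomposition; same result, order preserved).

-- Python's 'a < b' on two sets: proper subset (used by both programs)
def setProperLt (a b : PySem.Set Int) : Bool :=
  PySem.Set.issubset a b && !(PySem.Set.equal a b)

-- ===== PORT A =====
-- 'ind = selected_paths.index(deleted_item); del selected_paths[ind]' (the 'none' branch is
-- Python's ValueError; it is unreachable because every deleted_item was drawn from the list)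
def pyDelFirst (sel : List (List Int)) (d : List Int) : List (List Int) :=
  match PySem.List.index? sel d with
  | some ind => sel.eraseIdx ind
  | none => sel

def select_superset_paths (paths : List (List Int)) : List (List Int) :=
  -- selected_paths = paths[:]; for x in paths: … ; return selected_paths
  paths.foldl
    (fun selected x =>
      let superset := selected.foldl
        (fun acc y =>
          if setProperLt (PySem.Set.ofList x) (PySem.Set.ofList y) then acc ++ [y] else acc) []
      superset.foldl pyDelFirst selected)
    paths

-- ===== PORT B =====
def select_superset_paths_alt (paths : List (List Int)) : List (List Int) :=
  let sets := paths.map (fun p => PySem.Set.ofList p)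
  let order := PySem.List.sorted (PySem.List.pyRange 0 (PySem.List.len paths))
      (fun i => PySem.Set.len (PySem.List.pyGetD sets i [])) false
  let kept := order.foldl
      (fun (kept : List (Int × PySem.Set Int)) i =>
        let s := PySem.List.pyGetD sets i []
        if kept.any (fun p => setProperLt p.2 s) then kept else kept ++ [(i, s)]) []
  let keptIdx : PySem.Set Int := PySem.Set.ofList (kept.map (fun p => p.1))
  ((PySem.List.enumerate paths).filter (fun ip => keptIdx.contains ip.1)).map (fun ip => ip.2)

-- ===== PRECONDITION & SPEC =====
def Spec_select_superset_paths (paths : List (List Int)) (out : List (List Int)) : Prop := out = select_superset_paths_alt paths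
instance (paths : List (List Int)) (out : List (List Int)) : Decidable (Spec_select_superset_paths paths out) := by unfold Spec_select_superset_paths; infer_instance

-- ===== CLAIM (what is proved, stated in full; the proofs are below) =====
def Claim_equal_select_superset_paths : Prop := ∀ (paths : List (List Int)), Dom_select_superset_paths paths → Spec_select_superset_paths paths (select_superset_paths paths)

-- ===== LEMMAS AND PROOFS =====

-- the common characterisation: a path is kept iff no path's node-set is a proper subset of its
def goodPath (paths : List (List Int)) (y : List Int) : Bool :=
  !(paths.any (fun x => setProperLt (PySem.Set.ofList x) (PySem.Set.ofList y)))

-- proof-side abbreviations for B's port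
def sgets (paths : List (List Int)) (i : Int) : PySem.Set Int :=
  PySem.List.pyGetD (paths.map (fun p => PySem.Set.ofList p)) i []

def keyOf (paths : List (List Int)) (i : Int) : Int := PySem.Set.len (sgets paths i)

def rngOf (paths : List (List Int)) : List Int := PySem.List.pyRange 0 (PySem.List.len paths)

def goodIdx (paths : List (List Int)) (i : Int) : Bool :=
  !((rngOf paths).any (fun j => setProperLt (sgets paths j) (sgets paths i)))

def stepB (paths : List (List Int)) (acc : List (Int × PySem.Set Int)) (i : Int) :
    List (Int × PySem.Set Int) :=
  if acc.any (fun p => setProperLt p.2 (sgets paths i)) then acc else acc ++ [(i, sgets paths i)]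

def pairOf (paths : List (List Int)) (i : Int) : Int × PySem.Set Int := (i, sgets paths i)

def ordOf (paths : List (List Int)) : List Int :=
  PySem.List.sorted (rngOf paths) (keyOf paths) false

-- basic facts about setProperLt
lemma setPLt_irrefl (a : PySem.Set Int) : setProperLt a a = false := by
  have h : PySem.Set.equal a a = true := (PySem.Set.equal_iff a a).mpr (fun _ => Iff.rfl)
  simp [setProperLt, h]

lemma setPLt_trans {a b c : PySem.Set Int} (hab : setProperLt a b = true)
    (hbc : setProperLt b c = true) : setProperLt a c = true := by
  simp only [setProperLt, Bool.and_eq_true, Bool.not_eq_true'] at *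
  obtain ⟨hab1, hab2⟩ := hab
  obtain ⟨hbc1, hbc2⟩ := hbc
  rw [PySem.Set.issubset_iff] at *
  refine ⟨fun x hx => hbc1 x (hab1 x hx), ?_⟩
  by_contra hac
  rw [Bool.not_eq_false, PySem.Set.equal_iff] at hac
  have : PySem.Set.equal a b = true := by
    rw [PySem.Set.equal_iff]
    exact fun x => ⟨fun hx => hab1 x hx, fun hx => (hac x).mpr (hbc1 x hx)⟩
  rw [this] at hab2; cases hab2

lemma setPLt_length {a b : PySem.Set Int} (ha : a.Nodup) (hb : b.Nodup)
    (h : setProperLt a b = true) : a.length < b.length := by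
  simp only [setProperLt, Bool.and_eq_true, Bool.not_eq_true'] at h
  obtain ⟨h1, h2⟩ := h
  rw [PySem.Set.issubset_iff] at h1
  have hsub : a.toFinset ⊆ b.toFinset := by
    intro x hx
    rw [List.mem_toFinset] at *
    exact h1 x hx
  have hne : a.toFinset ≠ b.toFinset := by
    intro hEq
    have : PySem.Set.equal a b = true := by
      rw [PySem.Set.equal_iff]
      intro x
      constructor
      · intro hx; rw [← List.mem_toFinset, hEq, List.mem_toFinset] at hx; exact hx
      · intro hx; rw [← List.mem_toFinset, ← hEq, List.mem_toFinset] at hx; exact hx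
    rw [this] at h2; cases h2
  have := Finset.card_lt_card (lt_of_le_of_ne hsub hne)
  rwa [List.toFinset_card_of_nodup ha, List.toFinset_card_of_nodup hb] at this

lemma sgets_nodup (paths : List (List Int)) (i : Int) : (sgets paths i).Nodup := by
  unfold sgets PySem.List.pyGetD
  cases h : PySem.List.pyGet? (paths.map (fun p => PySem.Set.ofList p)) i with
  | none => simp
  | some s =>
    simp only [Option.getD_some]
    have hs : s ∈ paths.map (fun p => PySem.Set.ofList p) := by
      unfold PySem.List.pyGet? at h
      rcases Option.bind_eq_some_iff.mp h with ⟨k, _, hk2⟩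
      exact List.mem_of_getElem? hk2
    rcases List.mem_map.mp hs with ⟨p, _, rfl⟩
    exact PySem.Set.nodup_ofList p

lemma setPLt_keyOf {paths : List (List Int)} {j i : Int}
    (h : setProperLt (sgets paths j) (sgets paths i) = true) :
    keyOf paths j < keyOf paths i := by
  have := setPLt_length (sgets_nodup paths j) (sgets_nodup paths i) h
  unfold keyOf PySem.Set.len
  exact_mod_cast this

-- ===== A-side =====

lemma delFirst_cons_self (a : List Int) (t : List (List Int)) : pyDelFirst (a :: t) a = t := by
  unfold pyDelFirst
  rw [PySem.List.index?_cons_self]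
  rfl

lemma foldl_del_skip (ds : List (List Int)) : ∀ (t : List (List Int)) (a : List Int), a ∉ ds →
    ds.foldl pyDelFirst (a :: t) = a :: ds.foldl pyDelFirst t := by
  induction ds with
  | nil => intro t a _; simp
  | cons d ds ih =>
    intro t a ha
    have hne : a ≠ d := by rintro rfl; exact ha (List.mem_cons_self)
    have h1 : pyDelFirst (a :: t) d = a :: pyDelFirst t d := by
      unfold pyDelFirst
      rw [PySem.List.index?_cons_of_ne _ hne]
      cases h : PySem.List.index? t d <;> simp
    simp only [List.foldl_cons, h1]
    exact ih _ _ (fun h => ha (List.mem_cons_of_mem _ h))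

lemma foldl_del_filter (q : List Int → Bool) : ∀ (sel : List (List Int)),
    (sel.filter q).foldl pyDelFirst sel = sel.filter (fun y => !q y) := by
  intro sel
  induction sel with
  | nil => simp
  | cons a t ih =>
    by_cases hq : q a = true
    · have e1 : List.filter q (a :: t) = a :: List.filter q t := by simp [List.filter_cons, hq]
      have e2 : List.filter (fun y => !q y) (a :: t) = List.filter (fun y => !q y) t := by
        simp [List.filter_cons, hq]
      rw [e1, e2, List.foldl_cons, delFirst_cons_self, ih]
    · have hq' : q a = false := by simpa using hq
      have e1 : List.filter q (a :: t) = List.filter q t := by simp [List.filter_cons, hq']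
      have e2 : List.filter (fun y => !q y) (a :: t) = a :: List.filter (fun y => !q y) t := by
        simp [List.filter_cons, hq']
      have hna : a ∉ t.filter q := by
        intro h
        have := List.of_mem_filter h
        rw [hq'] at this; cases this
      rw [e1, e2, foldl_del_skip _ _ _ hna, ih]

lemma stepA_eq (x : List Int) (sel : List (List Int)) :
    (sel.foldl (fun acc y =>
        if setProperLt (PySem.Set.ofList x) (PySem.Set.ofList y) then acc ++ [y] else acc)
      []).foldl pyDelFirst sel
    = sel.filter (fun y => !(setProperLt (PySem.Set.ofList x) (PySem.Set.ofList y))) := by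
  have h := PySem.List.foldl_append_if
    (fun y => setProperLt (PySem.Set.ofList x) (PySem.Set.ofList y)) (fun y => y) sel []
  simp only [List.map_id'] at h
  rw [h]
  simpa using foldl_del_filter (fun y => setProperLt (PySem.Set.ofList x) (PySem.Set.ofList y)) sel

lemma foldl_filter_any {α β : Type} (f : α → β → Bool) (xs : List α) : ∀ (sel : List β),
    xs.foldl (fun s x => s.filter (fun y => !f x y)) sel
      = sel.filter (fun y => !xs.any (fun x => f x y)) := by
  induction xs with
  | nil => intro sel; simp
  | cons x xs ih =>
    intro sel
    simp only [List.foldl_cons, ih, List.filter_filter]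
    apply List.filter_congr
    intro y _
    simp [Bool.not_or, Bool.and_comm]

lemma A_eq (paths : List (List Int)) :
    select_superset_paths paths = paths.filter (goodPath paths) := by
  unfold select_superset_paths
  rw [List.foldl_ext _
    (fun s x => s.filter (fun y => !(setProperLt (PySem.Set.ofList x) (PySem.Set.ofList y)))) _
    (fun s x _ => stepA_eq x s)]
  rw [foldl_filter_any]
  rfl

-- ===== B-side =====

lemma ord_perm (paths : List (List Int)) : (ordOf paths).Perm (rngOf paths) :=
  PySem.List.sorted_perm _ _ _

lemma mem_ord_iff (paths : List (List Int)) (j : Int) :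
    j ∈ ordOf paths ↔ (0 ≤ j ∧ j < PySem.List.len paths) := by
  rw [(ord_perm paths).mem_iff]
  exact PySem.List.mem_pyRange_one

-- choose a size-minimal proper subset below i; it is itself good and strictly smaller
lemma exists_min_bad (paths : List (List Int)) (i : Int) (hbad : goodIdx paths i = false) :
    ∃ j₀, j₀ ∈ rngOf paths ∧ setProperLt (sgets paths j₀) (sgets paths i) = true ∧
      goodIdx paths j₀ = true ∧ keyOf paths j₀ < keyOf paths i := by
  unfold goodIdx at hbad
  rw [Bool.not_eq_false'] at hbad
  rcases List.any_eq_true.mp hbad with ⟨j, hj1, hj2⟩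
  set cand := (rngOf paths).filter (fun j => setProperLt (sgets paths j) (sgets paths i)) with hcand
  have hjc : j ∈ cand := List.mem_filter.mpr ⟨hj1, hj2⟩
  cases hmin : PySem.List.min? cand (keyOf paths) with
  | none =>
    rw [PySem.List.min?_eq_none_iff] at hmin
    rw [hmin] at hjc
    cases hjc
  | some j₀ =>
    have hj₀c := PySem.List.min?_mem hmin
    rcases List.mem_filter.mp hj₀c with ⟨hj₀r, hj₀lt⟩
    have hgood : goodIdx paths j₀ = true := by
      by_contra hg
      rw [Bool.not_eq_true] at hg
      unfold goodIdx at hg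
      rw [Bool.not_eq_false'] at hg
      rcases List.any_eq_true.mp hg with ⟨m, hm1, hm2⟩
      have hmc : m ∈ cand := List.mem_filter.mpr ⟨hm1, setPLt_trans hm2 hj₀lt⟩
      have h1 := PySem.List.min?_isMin hmin m hmc
      have h2 := setPLt_keyOf hm2
      omega
    exact ⟨j₀, hj₀r, hj₀lt, hgood, setPLt_keyOf hj₀lt⟩

lemma frontier_inv (paths : List (List Int)) : ∀ (suf pr : List Int),
    ordOf paths = pr ++ suf →
    suf.foldl (stepB paths) ((pr.filter (goodIdx paths)).map (pairOf paths))
      = ((ordOf paths).filter (goodIdx paths)).map (pairOf paths) := by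
  intro suf
  induction suf with
  | nil =>
    intro pr h
    rw [List.append_nil] at h
    rw [← h]
    rfl
  | cons i suf ih =>
    intro pr h
    rw [List.foldl_cons]
    have hkey : stepB paths ((pr.filter (goodIdx paths)).map (pairOf paths)) i
        = ((pr ++ [i]).filter (goodIdx paths)).map (pairOf paths) := by
      by_cases hGi : goodIdx paths i = true
      · have hany : ((pr.filter (goodIdx paths)).map (pairOf paths)).any
            (fun p => setProperLt p.2 (sgets paths i)) = false := by
          by_contra hc
          rw [Bool.not_eq_false, List.any_map, List.any_eq_true] at hc
          rcases hc with ⟨k, hk1, hk2⟩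
          have hkord : k ∈ ordOf paths := by
            rw [h]; exact List.mem_append_left _ (List.mem_filter.mp hk1).1
          have hkr : k ∈ rngOf paths := (ord_perm paths).mem_iff.mp hkord
          have : goodIdx paths i = false := by
            unfold goodIdx
            rw [Bool.not_eq_false']
            exact List.any_eq_true.mpr ⟨k, hkr, hk2⟩
          rw [this] at hGi; cases hGi
        unfold stepB
        rw [hany]
        simp [List.filter_append, List.filter_cons, hGi, pairOf]
      · have hGi' : goodIdx paths i = false := by simpa using hGi
        rcases exists_min_bad paths i hGi' with ⟨j₀, hj₀r, hj₀lt, hj₀g, hj₀k⟩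
        have hj₀pr : j₀ ∈ pr := by
          have hj₀ord : j₀ ∈ ordOf paths := (ord_perm paths).mem_iff.mpr hj₀r
          rw [h] at hj₀ord
          rcases List.mem_append.mp hj₀ord with hp | hs
          · exact hp
          · rcases List.mem_cons.mp hs with rfl | hss
            · rw [setPLt_irrefl] at hj₀lt; cases hj₀lt
            · exfalso
              have hpw := PySem.List.sorted_pairwise (rngOf paths) (keyOf paths)
              have hpw' : (ordOf paths).Pairwise (fun a b => keyOf paths a ≤ keyOf paths b) := hpw
              rw [h] at hpw'
              have hp2 := (List.pairwise_append.mp hpw').2.1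
              have hle : keyOf paths i ≤ keyOf paths j₀ := (List.pairwise_cons.mp hp2).1 j₀ hss
              omega
        have hany : ((pr.filter (goodIdx paths)).map (pairOf paths)).any
            (fun p => setProperLt p.2 (sgets paths i)) = true := by
          rw [List.any_map, List.any_eq_true]
          exact ⟨j₀, List.mem_filter.mpr ⟨hj₀pr, hj₀g⟩, hj₀lt⟩
        unfold stepB
        rw [hany]
        simp [List.filter_append, List.filter_cons, hGi']
    rw [hkey]
    exact ih (pr ++ [i]) (by rw [h]; simp)

lemma any_pyRange_getD {α : Type} (xs : List α) (d : α) (f : α → Bool) :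
    (PySem.List.pyRange 0 (PySem.List.len xs)).any (fun j => f (PySem.List.pyGetD xs j d))
      = xs.any f := by
  conv_rhs => rw [← PySem.List.map_pyGetD_pyRange_zero xs d]
  rw [List.any_map]
  rfl

lemma good_conv (paths : List (List Int)) (k : Nat) (hk : k < paths.length) :
    goodIdx paths (k : Int) = goodPath paths paths[k] := by
  have hsg : sgets paths (k : Int) = PySem.Set.ofList paths[k] := by
    unfold sgets
    rw [PySem.List.pyGetD_eq_getElem _ _ (by positivity) (by simp; exact_mod_cast hk)]
    simp
  unfold goodIdx goodPath rngOf
  rw [hsg]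
  have hlen : PySem.List.len paths = PySem.List.len (paths.map (fun p => PySem.Set.ofList p)) := by
    simp [PySem.List.len]
  rw [hlen]
  have := any_pyRange_getD (paths.map (fun p => PySem.Set.ofList p)) ([] : List Int)
    (fun t => setProperLt t (PySem.Set.ofList paths[k]))
  rw [show (fun j => setProperLt (sgets paths j) (PySem.Set.ofList paths[k]))
      = (fun j => (fun t => setProperLt t (PySem.Set.ofList paths[k]))
          (PySem.List.pyGetD (paths.map (fun p => PySem.Set.ofList p)) j [])) from rfl]
  rw [this, List.any_map]
  rfl

lemma enum_filter_snd {α : Type} (g : α → Bool) (xs : List α) : ∀ (s : Int),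
    ((PySem.List.enumerate xs s).filter (fun ip => g ip.2)).map (fun ip => ip.2)
      = xs.filter g := by
  induction xs with
  | nil => intro s; simp [PySem.List.enumerate]
  | cons x xs ih =>
    intro s
    rw [PySem.List.enumerate_cons]
    by_cases hg : g x = true
    · simp [List.filter_cons, hg, ih]
    · simp [List.filter_cons, Bool.eq_false_iff.mpr hg, ih]

lemma B_eq (paths : List (List Int)) :
    select_superset_paths_alt paths = paths.filter (goodPath paths) := by
  have h1 : select_superset_paths_alt paths =
      ((PySem.List.enumerate paths).filter (fun ip =>
        (PySem.Set.ofList (((ordOf paths).foldl (stepB paths) []).map (fun p => p.1))).contains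
          ip.1)).map (fun ip => ip.2) := rfl
  have h2 := frontier_inv paths (ordOf paths) [] (by simp)
  simp only [List.filter_nil, List.map_nil] at h2
  rw [h1, h2]
  have h3 : (((ordOf paths).filter (goodIdx paths)).map (pairOf paths)).map (fun p => p.1)
      = (ordOf paths).filter (goodIdx paths) := by
    rw [List.map_map, show ((fun p : Int × PySem.Set Int => p.1) ∘ pairOf paths) = id from rfl,
      List.map_id]
  rw [h3]
  have h4 : ((PySem.List.enumerate paths).filter (fun ip =>
        (PySem.Set.ofList ((ordOf paths).filter (goodIdx paths))).contains ip.1))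
      = ((PySem.List.enumerate paths).filter (fun ip => goodPath paths ip.2)) := by
    apply List.filter_congr
    intro ip hip
    rcases (PySem.List.mem_enumerate_iff _ _ _).mp hip with ⟨k, hk, rfl⟩
    simp only [zero_add]
    have hmem : ((k : Int)) ∈ ordOf paths := by
      rw [mem_ord_iff]
      constructor
      · positivity
      · simp [PySem.List.len]; exact_mod_cast hk
    by_cases hg : goodIdx paths (k : Int) = true
    · have hin : ((k : Int)) ∈ (ordOf paths).filter (goodIdx paths) :=
        List.mem_filter.mpr ⟨hmem, hg⟩
      have hc : (PySem.Set.ofList ((ordOf paths).filter (goodIdx paths))).contains (k : Int)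
          = true :=
        (PySem.Set.contains_iff _ _).mpr ((PySem.Set.mem_ofList _ _).mpr hin)
      rw [hc, ← good_conv paths k hk, hg]
    · have hg' : goodIdx paths (k : Int) = false := by simpa using hg
      have hnot : ((k : Int)) ∉ (ordOf paths).filter (goodIdx paths) := by
        intro hm
        have := (List.mem_filter.mp hm).2
        rw [hg'] at this; cases this
      have hc : (PySem.Set.ofList ((ordOf paths).filter (goodIdx paths))).contains (k : Int)
          = false := by
        rw [Bool.eq_false_iff]
        intro hc
        exact hnot ((PySem.Set.mem_ofList _ _).mp ((PySem.Set.contains_iff _ _).mp hc))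
      rw [hc, ← good_conv paths k hk, hg']
  rw [h4, enum_filter_snd]

-- ===== VERDICT (by name: the statement is the Claim_ definition above) =====
theorem select_superset_paths_spec : Claim_equal_select_superset_paths := by
  intro paths _
  unfold Spec_select_superset_paths
  rw [A_eq, B_eq]
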